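-- pv_equiv track=rewrite | github.com/anjaiah01/DSA-Journey | AlternateWords.py | alternateWords
-- ===== SOURCE A (Python) =====
-- def alternateWords(s):
--     length=len(s)
--     res=""
--     dots=0
--     temp=""
--     for char in s:
--         if char=="." and dots%2==0:
--             res+=temp+"."
--             temp=""
--             dots+=1
--         elif char=="." and dots%2!=0:
--             temp=""
--             dots+=1
--         else:
--             temp+=char
--     return res[:-1]
-- ===== SOURCE B (Python) =====
-- def alternateWords(s):
--     parts = s.split('.')
--     return '.'.join(parts[:-1][::2])
-- ===== Notes on version B (the rewrite author's own statement) =====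
-- stated objective: faster
-- what changed: Replaces the character-by-character state machine (accumulating a temp word, counting dot parity, trimming a trailing dot) by one decomposition: split on the dot separator, drop the last token, keep every second token, join with dots.
import Mathlib
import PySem

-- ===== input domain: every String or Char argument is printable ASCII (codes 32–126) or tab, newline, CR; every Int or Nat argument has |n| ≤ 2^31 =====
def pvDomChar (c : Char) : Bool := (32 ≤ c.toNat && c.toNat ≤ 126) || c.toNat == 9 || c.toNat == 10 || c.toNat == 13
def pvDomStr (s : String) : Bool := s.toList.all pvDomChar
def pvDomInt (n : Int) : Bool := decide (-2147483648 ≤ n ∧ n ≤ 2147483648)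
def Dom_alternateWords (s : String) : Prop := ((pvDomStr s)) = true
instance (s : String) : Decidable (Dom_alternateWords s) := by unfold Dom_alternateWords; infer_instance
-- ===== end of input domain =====

-- B replaces A's char-by-char state machine by split / drop-last / every-second / join; return values proved equal on all inputs.

-- ===== PORT A =====
-- state: (res, dots, temp) exactly as in the Python loop
def alternateWordsStep (st : List Char × Int × List Char) (char : Char) : List Char × Int × List Char :=
  if char = '.' ∧ PySem.Int.mod st.2.1 2 = 0 then (st.1 ++ st.2.2 ++ ['.'], st.2.1 + 1, [])
  else if char = '.' ∧ PySem.Int.mod st.2.1 2 ≠ 0 then (st.1, st.2.1 + 1, [])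
  else (st.1, st.2.1, st.2.2 ++ [char])

def alternateWords (s : String) : String :=
  let st := s.toList.foldl alternateWordsStep ([], 0, [])
  String.ofList (PySem.List.slice st.1 none (some (-1)))   -- res[:-1]

-- ===== PORT B =====
def alternateWords_alt (s : String) : String :=
  let parts := (PySem.Chars.split? s.toList ['.']).getD []      -- s.split('.'); sep nonempty so never none
  let sel := (PySem.List.slice? (PySem.List.slice parts none (some (-1))) none none 2).getD []
      -- parts[:-1][::2]; step 2 ≠ 0 so never none
  String.ofList (PySem.Chars.join ['.'] sel)                    -- '.'.join(...)

-- ===== PRECONDITION & SPEC =====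
def Spec_alternateWords (s : String) (out : String) : Prop := out = alternateWords_alt s
instance (s : String) (out : String) : Decidable (Spec_alternateWords s out) := by unfold Spec_alternateWords; infer_instance

-- ===== CLAIM (what is proved, stated in full; the proofs are below) =====
def Claim_equal_alternateWords : Prop := ∀ (s : String), Dom_alternateWords s → Spec_alternateWords s (alternateWords s)

-- ===== LEMMAS AND PROOFS =====

-- split of a char list on '.' as a plain structural recursion
def msplit : List Char → List (List Char)
  | [] => [[]]
  | c :: rest => if c = '.' then [] :: msplit rest else (msplit rest).modifyHead (c :: ·)

theorem msplit_ne_nil (l : List Char) : msplit l ≠ [] := by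
  induction l with
  | nil => simp [msplit]
  | cons c rest ih =>
    simp only [msplit]
    split
    · simp
    · cases h : msplit rest with
      | nil => exact absurd h ih
      | cons t ts => simp [List.modifyHead]

-- prepend p onto the first token
def ph (p : List Char) : List (List Char) → List (List Char)
  | [] => [p]
  | t :: ts => (p ++ t) :: ts

-- the characters A's res accumulates, token by token, p = "dots is even"
def emitE : Bool → List (List Char) → List Char
  | _, [] => []
  | _, [_] => []
  | p, t :: ts => (if p then t ++ ['.'] else []) ++ emitE (!p) ts

-- every second element, starting with the first
def everyOther {α : Type} : List α → List α
  | [] => []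
  | [x] => [x]
  | x :: _ :: rest => x :: everyOther rest

theorem everyOther_cons {α : Type} (x : α) (l : List α) :
    everyOther (x :: l) = x :: everyOther l.tail := by
  cases l <;> simp [everyOther]

theorem go_eq (fuel : Nat) : ∀ (l cur : List Char) (acc : List (List Char)),
    l.length < fuel →
    PySem.Chars.splitOn.go ['.'] fuel l cur acc = acc.reverse ++ ph cur.reverse (msplit l) := by
  induction fuel with
  | zero => intro l cur acc h; omega
  | succ f ih =>
    intro l cur acc h
    cases l with
    | nil => simp [PySem.Chars.splitOn.go, msplit, ph]
    | cons c rest =>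
      by_cases hc : c = '.'
      · subst hc
        rw [show PySem.Chars.splitOn.go ['.'] (f+1) ('.' :: rest) cur acc
              = PySem.Chars.splitOn.go ['.'] f rest [] (cur.reverse :: acc) by
            simp [PySem.Chars.splitOn.go, List.isPrefixOf]]
        rw [ih rest [] (cur.reverse :: acc) (by simpa using Nat.lt_of_succ_lt_succ h)]
        have hne := msplit_ne_nil rest
        cases hm : msplit rest with
        | nil => exact absurd hm hne
        | cons t ts => simp [msplit, hm, ph]
      · rw [show PySem.Chars.splitOn.go ['.'] (f+1) (c :: rest) cur acc
              = PySem.Chars.splitOn.go ['.'] f rest (c :: cur) acc by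
            simp [PySem.Chars.splitOn.go, List.isPrefixOf, Ne.symm hc]]
        rw [ih rest (c :: cur) acc (by simpa using Nat.lt_of_succ_lt_succ h)]
        have hne := msplit_ne_nil rest
        cases hm : msplit rest with
        | nil => exact absurd hm hne
        | cons t ts => simp [msplit, hc, hm, ph, List.modifyHead]

theorem splitOn_eq_msplit (l : List Char) : PySem.Chars.splitOn l ['.'] = msplit l := by
  rw [PySem.Chars.splitOn, go_eq (l.length + 1) l [] [] (by omega)]
  have hne := msplit_ne_nil l
  cases hm : msplit l with
  | nil => exact absurd hm hne
  | cons t ts => simp [ph]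

theorem mod_succ_two (d : Int) : (PySem.Int.mod (d + 1) 2 = 0) ↔ ¬ (PySem.Int.mod d 2 = 0) := by
  rw [PySem.Int.mod_eq_emod_of_pos (by norm_num : (0:Int) < 2),
      PySem.Int.mod_eq_emod_of_pos (by norm_num : (0:Int) < 2)]
  omega

-- the loop invariant of A's fold
theorem step_dot_even (res temp : List Char) (dots : Int) (hd : PySem.Int.mod dots 2 = 0) :
    alternateWordsStep (res, dots, temp) '.' = (res ++ temp ++ ['.'], dots + 1, []) := by
  unfold alternateWordsStep
  rw [if_pos ⟨rfl, hd⟩]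

theorem step_dot_odd (res temp : List Char) (dots : Int) (hd : ¬ PySem.Int.mod dots 2 = 0) :
    alternateWordsStep (res, dots, temp) '.' = (res, dots + 1, []) := by
  unfold alternateWordsStep
  rw [if_neg (fun h => hd h.2), if_pos ⟨rfl, hd⟩]

theorem step_other (res temp : List Char) (dots : Int) (c : Char) (hc : ¬ c = '.') :
    alternateWordsStep (res, dots, temp) c = (res, dots, temp ++ [c]) := by
  unfold alternateWordsStep
  rw [if_neg (fun h => hc h.1), if_neg (fun h => hc h.1)]

theorem fold_eq (l : List Char) : ∀ (res temp : List Char) (dots : Int),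
    (l.foldl alternateWordsStep (res, dots, temp)).1 =
      res ++ emitE (decide (PySem.Int.mod dots 2 = 0)) (ph temp (msplit l)) := by
  induction l with
  | nil => intro res temp dots; simp [msplit, ph, emitE]
  | cons c rest ih =>
    intro res temp dots
    by_cases hc : c = '.'
    · subst hc
      by_cases hd : PySem.Int.mod dots 2 = 0
      · rw [List.foldl_cons, step_dot_even res temp dots hd, ih]
        have h1 : decide (PySem.Int.mod (dots + 1) 2 = 0) = false :=
          decide_eq_false (fun h => (mod_succ_two dots).mp h hd)
        have h2 : decide (PySem.Int.mod dots 2 = 0) = true := decide_eq_true hd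
        have hne := msplit_ne_nil rest
        cases hm : msplit rest with
        | nil => exact absurd hm hne
        | cons t ts =>
          rw [h1, h2]
          rw [show msplit ('.' :: rest) = [] :: msplit rest by simp [msplit]]
          rw [hm]
          show res ++ temp ++ ['.'] ++ emitE false (ph [] (t :: ts)) =
            res ++ emitE true ((temp ++ []) :: t :: ts)
          cases ts <;> simp [ph, emitE]
      · rw [List.foldl_cons, step_dot_odd res temp dots hd, ih]
        have h1 : decide (PySem.Int.mod (dots + 1) 2 = 0) = true :=
          decide_eq_true ((mod_succ_two dots).mpr hd)
        have h2 : decide (PySem.Int.mod dots 2 = 0) = false := decide_eq_false hd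
        have hne := msplit_ne_nil rest
        cases hm : msplit rest with
        | nil => exact absurd hm hne
        | cons t ts =>
          rw [h1, h2]
          rw [show msplit ('.' :: rest) = [] :: msplit rest by simp [msplit]]
          rw [hm]
          show res ++ emitE true (ph [] (t :: ts)) =
            res ++ emitE false ((temp ++ []) :: t :: ts)
          cases ts <;> simp [ph, emitE]
    · rw [List.foldl_cons, step_other res temp dots c hc, ih]
      have hne := msplit_ne_nil rest
      cases hm : msplit rest with
      | nil => exact absurd hm hne
      | cons t ts =>
        rw [show msplit (c :: rest) = (msplit rest).modifyHead (c :: ·) by simp [msplit, hc]]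
        rw [hm]
        show res ++ emitE _ (ph (temp ++ [c]) (t :: ts)) =
          res ++ emitE _ (ph temp ((c :: t) :: ts))
        simp [ph]

-- emitE rendered through everyOther
theorem emitE_eq (ts : List (List Char)) :
    emitE true ts = (everyOther ts.dropLast).flatMap (· ++ ['.']) ∧
    emitE false ts = (everyOther ts.dropLast.tail).flatMap (· ++ ['.']) := by
  induction ts with
  | nil => simp [emitE, everyOther]
  | cons t rest ih =>
    cases rest with
    | nil => simp [emitE, everyOther]
    | cons u r =>
      constructor
      · show (if true then t ++ ['.'] else []) ++ emitE false (u :: r) = _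
        rw [if_pos rfl, ih.2]
        rw [show (t :: u :: r).dropLast = t :: (u :: r).dropLast by simp [List.dropLast_cons₂]]
        rw [everyOther_cons]
        simp
      · show (if false then t ++ ['.'] else []) ++ emitE true (u :: r) = _
        rw [if_neg (by simp), ih.1]
        rw [show (t :: u :: r).dropLast = t :: (u :: r).dropLast by simp [List.dropLast_cons₂]]
        simp

theorem dropLast_flatMap_dot (xs : List (List Char)) :
    ((xs.flatMap (· ++ ['.']))).dropLast = List.intercalate ['.'] xs := by
  induction xs with
  | nil => simp [List.intercalate]
  | cons x rest ih =>
    cases rest with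
    | nil => simp [List.intercalate, List.intersperse]
    | cons y r =>
      have hne : (y :: r).flatMap (· ++ ['.']) ≠ [] := by
        simp [List.flatMap]
      rw [show ((x :: y :: r).flatMap (· ++ ['.'])) = (x ++ ['.']) ++ (y :: r).flatMap (· ++ ['.']) by
            simp [List.flatMap]]
      rw [List.dropLast_append_of_ne_nil hne, ih]
      simp [List.intercalate, List.intersperse]

theorem fm_two {α : Type} (xs : List α) :
    List.filterMap (fun k : Nat => xs[2 * k]?) (List.range ((xs.length + 1) / 2)) = everyOther xs := by
  induction xs using everyOther.induct with
  | case1 => simp [everyOther]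
  | case2 x => simp [everyOther]
  | case3 x y rest ih =>
    have hcount : ((x :: y :: rest).length + 1) / 2 = (rest.length + 1) / 2 + 1 := by
      simp only [List.length_cons]; omega
    rw [hcount, List.range_succ_eq_map, List.filterMap_cons, List.filterMap_map]
    have hf : (fun k : Nat => (x :: y :: rest)[2 * k]?) ∘ Nat.succ
        = fun k : Nat => rest[2 * k]? := by
      funext k
      show (x :: y :: rest)[2 * (k + 1)]? = rest[2 * k]?
      rw [show 2 * (k + 1) = (2 * k + 1) + 1 by omega, List.getElem?_cons_succ,
          List.getElem?_cons_succ]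
    rw [hf]
    simp only [show (2 : Nat) * 0 = 0 by rfl, List.getElem?_cons_zero]
    rw [ih]
    simp [everyOther]

-- xs[::2] is everyOther xs
theorem slice?_two {α : Type} (xs : List α) :
    PySem.List.slice? xs none none 2 = some (everyOther xs) := by
  have hs : PySem.List.sliceIndices xs.length none none 2 = (0, (xs.length : Int), 2) := by
    norm_num [PySem.List.sliceIndices]
  rw [PySem.List.slice?, if_neg (by norm_num : ¬ (2 : Int) = 0), hs]
  cases xs with
  | nil => norm_num [everyOther]
  | cons x rest =>
    have hpos : (0 : Int) < ((x :: rest).length : Int) := by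
      simp only [List.length_cons]; omega
    have hcount : (if (0:Int) < 2 then
        if (0:Int) < ((x :: rest).length : Int) then
          ((((x :: rest).length : Int) - 0 + 2 - 1) / 2).toNat else 0
      else if ((x :: rest).length : Int) < 0 then
          (((0:Int) - ((x :: rest).length : Int) + -2 - 1) / -2).toNat else 0)
      = ((x :: rest).length + 1) / 2 := by
      rw [if_pos (by norm_num), if_pos hpos]; omega
    simp only [hcount]
    have hidx : ∀ k : Nat, ((0 : Int) + 2 * (k : Int)).toNat = 2 * k := by intro k; omega
    simp only [hidx]
    rw [fm_two]

-- ===== VERDICT (by name: the statement is the Claim_ definition above) =====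
theorem alternateWords_spec : Claim_equal_alternateWords := by
  intro s _
  unfold Spec_alternateWords alternateWords alternateWords_alt
  rw [show PySem.Chars.split? s.toList ['.'] = some (msplit s.toList) by
        simp [PySem.Chars.split?, splitOn_eq_msplit]]
  simp only [Option.getD_some]
  rw [PySem.List.slice_to_neg_one, slice?_two, Option.getD_some]
  rw [fold_eq s.toList [] [] 0]
  rw [show ph [] (msplit s.toList) = msplit s.toList by
        have hne := msplit_ne_nil s.toList
        cases hm : msplit s.toList with
        | nil => exact absurd hm hne
        | cons t ts => simp [ph]]
  rw [PySem.List.slice_to_neg_one]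
  simp only [List.nil_append]
  rw [show decide (PySem.Int.mod 0 2 = 0) = true by decide]
  rw [(emitE_eq (msplit s.toList)).1, dropLast_flatMap_dot]
  rfl
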